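-- pv_equiv track=rewrite | github.com/Glennonr/swim-dojo-workouts | generate_index.py | categorize_filters
-- ===== SOURCE A (Python) =====
-- def categorize_filters(categories):
--     distance = [c for c in categories if any(x in c for x in ("-", "+"))]
--     difficulty_order = ["Beginner", "Intermediate", "Advanced", "Hard", "Insane"]
--     difficulty = [c for c in difficulty_order if c in categories]
--     stroke = [c for c in categories if c in ("Freestyle", "Backstroke", "Breaststroke", "Butterfly", "IM", "Stroke")]
--     other = [c for c in categories if c not in distance + difficulty + stroke]
--     return {
--         "Distance": distance,
--         "Difficulty": difficulty,
--         "Stroke": stroke,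
--         "Other": sorted(other),
--     }
-- ===== SOURCE B (Python) =====
-- def categorize_filters(categories):
--     strokes = {"Freestyle", "Backstroke", "Breaststroke", "Butterfly", "IM", "Stroke"}
--     levels = ["Beginner", "Intermediate", "Advanced", "Hard", "Insane"]
--     distance, stroke, other = [], [], []
--     for c in categories:
--         if "-" in c or "+" in c:
--             distance.append(c)
--         elif c in strokes:
--             stroke.append(c)
--         elif c not in levels:
--             other.append(c)
--     other.sort()
--     difficulty = [lvl for lvl in levels if lvl in categories]
--     return {"Distance": distance, "Difficulty": difficulty, "Stroke": stroke, "Other": other}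
-- ===== Notes on version B (the rewrite author's own statement) =====
-- stated objective: alternative
-- what changed: The three repeated scans over categories (distance, stroke, and 'other' which rescans the concatenation of the first buckets with a linear 'not in' per element) are replaced by a single pass with an if/elif chain routing each element to its bucket directly; difficulty stays a filter over the fixed level list.
import Mathlib
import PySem

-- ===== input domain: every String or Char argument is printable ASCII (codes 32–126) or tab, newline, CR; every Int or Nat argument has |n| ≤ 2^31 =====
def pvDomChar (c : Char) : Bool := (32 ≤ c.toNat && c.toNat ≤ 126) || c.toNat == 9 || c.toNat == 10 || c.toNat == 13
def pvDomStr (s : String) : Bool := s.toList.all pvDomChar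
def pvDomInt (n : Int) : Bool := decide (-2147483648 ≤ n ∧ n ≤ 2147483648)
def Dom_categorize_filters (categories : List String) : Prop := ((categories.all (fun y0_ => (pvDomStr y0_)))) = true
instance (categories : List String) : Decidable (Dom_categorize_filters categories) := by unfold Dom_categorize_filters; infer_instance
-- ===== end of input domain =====

-- B replaces A's repeated filter scans (the 'other' bucket rescans the concatenation of the first
-- three buckets) with a single if/elif pass that routes each element to its bucket directly;
-- same return value, similar cost ("alternative").


-- ===== PORT A =====
def categorize_filters (categories : List String) : List (String × List String) :=
  let distance := categories.filter (fun c => (["-", "+"] : List String).any (fun x => PySem.Str.isIn x c))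
  let difficulty_order : List String := ["Beginner", "Intermediate", "Advanced", "Hard", "Insane"]
  let difficulty := difficulty_order.filter (fun c => categories.contains c)
  let stroke := categories.filter (fun c =>
    (["Freestyle", "Backstroke", "Breaststroke", "Butterfly", "IM", "Stroke"] : List String).contains c)
  let other := categories.filter (fun c => !((distance ++ difficulty ++ stroke).contains c))
  [("Distance", distance), ("Difficulty", difficulty), ("Stroke", stroke),
   ("Other", PySem.List.sorted other (fun x => x) false)]

-- ===== PORT B =====
def altStrokes : List String := ["Freestyle", "Backstroke", "Breaststroke", "Butterfly", "IM", "Stroke"]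
def altLevels : List String := ["Beginner", "Intermediate", "Advanced", "Hard", "Insane"]

-- the single for-loop of Source B: route each element to (distance, stroke, other)
def altLoop : List String → List String × List String × List String
  | [] => ([], [], [])
  | c :: rest =>
    let (d, s, o) := altLoop rest
    if PySem.Str.isIn "-" c || PySem.Str.isIn "+" c then (c :: d, s, o)
    else if altStrokes.contains c then (d, c :: s, o)
    else if altLevels.contains c then (d, s, o)
    else (d, s, c :: o)

def categorize_filters_alt (categories : List String) : List (String × List String) :=
  let (distance, stroke, other) := altLoop categories
  let difficulty := altLevels.filter (fun lvl => categories.contains lvl)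
  [("Distance", distance), ("Difficulty", difficulty), ("Stroke", stroke),
   ("Other", PySem.List.sorted other (fun x => x) false)]

-- ===== PRECONDITION & SPEC =====
def Spec_categorize_filters (categories : List String) (out : List (String × List String)) : Prop := out = categorize_filters_alt categories
instance (categories : List String) (out : List (String × List String)) : Decidable (Spec_categorize_filters categories out) := by unfold Spec_categorize_filters; infer_instance

-- ===== CLAIM (what is proved, stated in full; the proofs are below) =====
def Claim_equal_categorize_filters : Prop := ∀ (categories : List String), Dom_categorize_filters categories → Spec_categorize_filters categories (categorize_filters categories)

-- ===== LEMMAS AND PROOFS =====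

-- the distance test of both programs
def isDist (c : String) : Bool := PySem.Str.isIn "-" c || PySem.Str.isIn "+" c

-- B's loop computes the three filters A computes
theorem altLoop_eq (l : List String) :
    altLoop l = (l.filter isDist,
                 l.filter (fun c => !isDist c && altStrokes.contains c),
                 l.filter (fun c => !isDist c && !altStrokes.contains c && !altLevels.contains c)) := by
  induction l with
  | nil => rfl
  | cons c rest ih =>
      by_cases hm : PySem.Chars.isIn ['-'] c.toList = true
      · simp [altLoop, ih, List.filter_cons, isDist, hm]
      · by_cases hp : PySem.Chars.isIn ['+'] c.toList = true
        · simp [altLoop, ih, List.filter_cons, isDist, hm, hp]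
        · by_cases h2 : c ∈ altStrokes
          · simp [altLoop, ih, isDist, hm, hp, h2]
          · by_cases h3 : c ∈ altLevels
            · simp [altLoop, ih, isDist, hm, hp, h2, h3]
            · simp [altLoop, ih, isDist, hm, hp, h2, h3]

-- no stroke name contains '-' or '+'
theorem stroke_not_dist (c : String) (h : altStrokes.contains c = true) : isDist c = false := by
  simp only [altStrokes, List.contains_eq_mem, List.mem_cons, decide_eq_true_eq] at h
  simp only [List.not_mem_nil, or_false] at h
  rcases h with h | h | h | h | h | h <;> subst h <;> decide

theorem categorize_filters_spec : Claim_equal_categorize_filters := by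
  intro categories _
  unfold Spec_categorize_filters
  simp only [categorize_filters, categorize_filters_alt, altLoop_eq]
  have hd : (fun c => (["-", "+"] : List String).any (fun x => PySem.Str.isIn x c)) = isDist := by
    funext c; simp [isDist]
  rw [hd]
  have hs : categories.filter (fun c =>
      (["Freestyle", "Backstroke", "Breaststroke", "Butterfly", "IM", "Stroke"] : List String).contains c)
      = categories.filter (fun c => !isDist c && altStrokes.contains c) := by
    apply List.filter_congr
    intro c _
    show altStrokes.contains c = (!isDist c && altStrokes.contains c)
    by_cases h2 : c ∈ altStrokes
    · have hnd := stroke_not_dist c (by simpa [List.contains_eq_mem] using h2)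
      simp [List.contains_eq_mem, h2, hnd]
    · simp [List.contains_eq_mem, h2]
  have hdiff : (["Beginner", "Intermediate", "Advanced", "Hard", "Insane"] : List String) = altLevels := rfl
  rw [hdiff, hs]
  have hother : categories.filter (fun c =>
      !((categories.filter isDist ++ altLevels.filter (fun c => categories.contains c)
         ++ categories.filter (fun c => !isDist c && altStrokes.contains c)).contains c))
      = categories.filter (fun c => !isDist c && !altStrokes.contains c && !altLevels.contains c) := by
    apply List.filter_congr
    intro c hc
    by_cases hm : PySem.Chars.isIn ['-'] c.toList = true
    · simp [List.contains_eq_mem, List.mem_append, List.mem_filter, hc, hm, isDist]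
    · by_cases hp : PySem.Chars.isIn ['+'] c.toList = true
      · simp [List.contains_eq_mem, List.mem_append, List.mem_filter, hc, hm, hp, isDist]
      · by_cases bs : c ∈ altStrokes
        · simp [List.contains_eq_mem, List.mem_append, List.mem_filter, hc, hm, hp, bs, isDist]
        · by_cases bl : c ∈ altLevels
          · simp [List.contains_eq_mem, List.mem_append, List.mem_filter, hc, hm, hp, bs, bl, isDist]
          · simp [List.contains_eq_mem, List.mem_append, List.mem_filter, hc, hm, hp, bs, bl, isDist]
  rw [hother]
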